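-- pv_equiv track=rewrite | github.com/dvidbruhm/axceta | ultrasound/us/forecasting/algos.py | find_consecutive
-- ===== SOURCE A (Python) =====
-- def find_consecutive(data, min_len: int = 10):
--     data = data.copy()                   # avoid mutating the original list
--     counting = []                      # keep track of True indexes, to count them later
--     for i in range(len(data)):          # cycle by index
--         is_last = i + 1 >= len(data)    # True if this is the last index in the array
--         if data[i] == True:
--             counting.append(i)         # add value to list if True
--         if is_last or data[i] == False:  # when we are at the last entry, or find a False
--             if len(counting) < min_len:      # check the length of our True indexes, and if less than 6
--                 for j in counting:
--                     data[j] = False     # make each False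
--             counting = []
--     return data
-- ===== SOURCE B (Python) =====
-- def find_consecutive(data, min_len: int = 10):
--     # Rebuild the output left to right from run lengths: a maximal run of
--     # `run` consecutive True values is emitted as True only if run >= min_len,
--     # otherwise as False; False values pass through.
--     result = []
--     run = 0
--     for v in data:
--         if v:
--             run += 1
--         else:
--             result.extend([run >= min_len] * run)
--             result.append(False)
--             run = 0
--     result.extend([run >= min_len] * run)
--     return result
-- ===== Notes on version B (the rewrite author's own statement) =====
-- stated objective: simpler
-- what changed: B rebuilds the output in one left-to-right pass from run lengths (emit run copies of run>=min_len at each run end) instead of A's index bookkeeping with a counting list and in-place clearing of a copied list.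
import Mathlib
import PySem

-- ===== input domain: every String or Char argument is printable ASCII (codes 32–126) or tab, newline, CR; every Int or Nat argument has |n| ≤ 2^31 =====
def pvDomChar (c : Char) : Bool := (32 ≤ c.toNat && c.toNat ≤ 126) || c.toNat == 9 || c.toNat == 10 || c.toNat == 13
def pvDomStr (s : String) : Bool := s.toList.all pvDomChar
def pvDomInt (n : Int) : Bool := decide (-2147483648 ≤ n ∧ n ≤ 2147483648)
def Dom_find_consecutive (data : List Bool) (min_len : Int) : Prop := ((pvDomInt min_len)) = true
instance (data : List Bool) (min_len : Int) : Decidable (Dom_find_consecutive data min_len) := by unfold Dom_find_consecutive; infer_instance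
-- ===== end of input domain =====

-- B rebuilds the output in one pass from run lengths instead of A's index
-- bookkeeping + in-place clearing; objective: simpler. A mutates only a copy,
-- so return-value equivalence is full equivalence.

-- ===== PORT A =====
-- the body of A's `for i in range(len(data))` loop; state = (data, counting)
def fcStep (n min_len : Int) (st : List Bool × List Int) (i : Int) : List Bool × List Int :=
  let d := st.1
  let counting := st.2
  let is_last : Bool := decide (i + 1 ≥ n)
  let counting := if (d.getD i.toNat false) == true then counting ++ [i] else counting
  if is_last || ((d.getD i.toNat false) == false) then
    (if (counting.length : Int) < min_len then
       counting.foldl (fun dd j => dd.set j.toNat false) d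
     else d, [])
  else (d, counting)

def find_consecutive (data : List Bool) (min_len : Int) : List Bool :=
  ((PySem.List.pyRange 0 (data.length : Int) 1).foldl (fcStep (data.length : Int) min_len) (data, [])).1

-- ===== PORT B =====
-- `[run >= min_len] * run`
def fcFlush (min_len : Int) (run : Nat) : List Bool := List.replicate run (decide ((run : Int) ≥ min_len))

def find_consecutive_alt (data : List Bool) (min_len : Int) : List Bool :=
  let st := data.foldl
    (fun (st : List Bool × Nat) v =>
      if v then (st.1, st.2 + 1)
      else (st.1 ++ fcFlush min_len st.2 ++ [false], 0))
    ([], 0)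
  st.1 ++ fcFlush min_len st.2

-- ===== PRECONDITION & SPEC =====
def Spec_find_consecutive (data : List Bool) (min_len : Int) (out : List Bool) : Prop := out = find_consecutive_alt data min_len
instance (data : List Bool) (min_len : Int) (out : List Bool) : Decidable (Spec_find_consecutive data min_len out) := by unfold Spec_find_consecutive; infer_instance

-- ===== CLAIM (what is proved, stated in full; the proofs are below) =====
def Claim_equal_find_consecutive : Prop := ∀ (data : List Bool) (min_len : Int), Dom_find_consecutive data min_len → Spec_find_consecutive data min_len (find_consecutive data min_len)

-- ===== LEMMAS AND PROOFS =====

-- recursive description of B's single pass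
def fcGo (min_len : Int) : List Bool → Nat → List Bool
  | [], run => fcFlush min_len run
  | true :: t, run => fcGo min_len t (run + 1)
  | false :: t, run => fcFlush min_len run ++ false :: fcGo min_len t 0

theorem fcGo_foldl (min_len : Int) (l : List Bool) (res : List Bool) (run : Nat) :
    (l.foldl
      (fun (st : List Bool × Nat) v =>
        if v then (st.1, st.2 + 1)
        else (st.1 ++ fcFlush min_len st.2 ++ [false], 0))
      (res, run)).1
    ++ fcFlush min_len
      (l.foldl
        (fun (st : List Bool × Nat) v =>
          if v then (st.1, st.2 + 1)
          else (st.1 ++ fcFlush min_len st.2 ++ [false], 0))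
        (res, run)).2
    = res ++ fcGo min_len l run := by
  induction l generalizing res run with
  | nil => simp [fcGo]
  | cons v t ih =>
    cases v with
    | true =>
      rw [List.foldl_cons]
      simp only [if_true]
      exact (ih res (run + 1)).trans (by simp [fcGo])
    | false =>
      rw [List.foldl_cons]
      simp only [Bool.false_eq_true, if_false]
      exact (ih (res ++ fcFlush min_len run ++ [false]) 0).trans
        (by simp [fcGo, List.append_assoc])

theorem set_append_len (res t : List Bool) (x b : Bool) :
    (res ++ x :: t).set res.length b = res ++ b :: t := by
  induction res with
  | nil => simp
  | cons h r ih => simp [List.set, ih]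

theorem clear_run (run : Nat) (res rest : List Bool) :
    ((List.range' res.length run).map (Int.ofNat)).foldl
        (fun dd j => dd.set j.toNat false)
        (res ++ List.replicate run true ++ rest)
      = res ++ List.replicate run false ++ rest := by
  induction run generalizing res with
  | zero => simp
  | succ k ih =>
    rw [List.range'_succ]
    simp only [List.map_cons, List.foldl_cons, List.replicate_succ]
    have h1 : (res ++ (true :: (List.replicate k true ++ rest))).set
        ((Int.ofNat res.length).toNat) false
        = res ++ false :: (List.replicate k true ++ rest) := by
      simpa using set_append_len res (List.replicate k true ++ rest) true false
    have h2 := ih (res ++ [false])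
    simp only [List.append_assoc, List.cons_append, List.nil_append] at h1 h2 ⊢
    rw [h1]
    have : res.length + 1 = (res ++ [false]).length := by simp
    rw [this, h2]

theorem getD_mid (res t : List Bool) (x : Bool) :
    (res ++ x :: t).getD res.length false = x := by
  induction res with
  | nil => simp
  | cons h r ih => simpa using ih

-- A's loop from index res.length + run, with the current run recorded in
-- counting, produces res followed by B's processing of the rest.
theorem fcMain (min_len : Int) (rest : List Bool) (res : List Bool) (run : Nat)
    (hne : rest ≠ []) :
    (((PySem.List.pyRange ((res.length + run : Nat) : Int)
        (((res ++ List.replicate run true ++ rest).length : Nat) : Int) 1).foldl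
       (fcStep (((res ++ List.replicate run true ++ rest).length : Nat) : Int) min_len)
       (res ++ List.replicate run true ++ rest,
        (List.range' res.length run).map (Int.ofNat))).1)
    = res ++ fcGo min_len rest run := by
  induction rest generalizing res run with
  | nil => exact absurd rfl hne
  | cons v t ih =>
    have hlen : ((res ++ List.replicate run true ++ v :: t).length : Int)
        = (res.length : Int) + run + 1 + t.length := by
      push_cast [List.length_append, List.length_replicate, List.length_cons]; ring
    have hlt : ((res.length + run : Nat) : Int)
        < ((res ++ List.replicate run true ++ v :: t).length : Int) := by
      rw [hlen]; omega
    rw [PySem.List.pyRange_one_cons (by exact hlt)]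
    rw [List.foldl_cons]
    have hget : (res ++ List.replicate run true ++ v :: t).getD
        (((res.length + run : Nat) : Int)).toNat false = v := by
      have h1 : (((res.length + run : Nat) : Int)).toNat
          = (res ++ List.replicate run true).length := by
        rw [Int.toNat_natCast]; simp
      rw [List.append_assoc, h1, ← List.append_assoc]
      exact getD_mid (res ++ List.replicate run true) t v
    cases t with
    | nil =>
      -- last index: is_last is true, the run is flushed inside the loop
      have hlast : decide (((res.length + run : Nat) : Int) + 1
          ≥ ((res ++ List.replicate run true ++ [v]).length : Int)) = true := by
        simp only [decide_eq_true_eq]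
        push_cast [List.length_append, List.length_replicate, List.length_cons, List.length_nil]
        omega
      have hend : PySem.List.pyRange (((res.length + run : Nat) : Int) + 1)
          ((res ++ List.replicate run true ++ [v]).length : Int) 1 = [] := by
        rw [PySem.List.pyRange_one]
        have h0 : ((res ++ List.replicate run true ++ [v]).length : Int)
            - (((res.length + run : Nat) : Int) + 1) = 0 := by
          push_cast [List.length_append, List.length_replicate, List.length_cons, List.length_nil]
          ring
        rw [h0]; simp
      cases v with
      | true =>
        simp only [fcStep, hget, hlast, beq_self_eq_true, Bool.true_or, Bool.false_or, eq_self_iff_true, if_true, if_false, Bool.false_eq_true,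
          show ((false : Bool) == true) = false from rfl, show ((true : Bool) == false) = false from rfl]
        have hcnt : ((List.range' res.length run).map (Int.ofNat)
            ++ [((res.length + run : Nat) : Int)])
            = (List.range' res.length (run + 1)).map (Int.ofNat) := by
          rw [show List.range' res.length (run + 1)
              = List.range' res.length run ++ [res.length + run] by
            simpa using List.range'_concat (s := res.length) (n := run) (step := 1)]
          simp
        have hrep : res ++ List.replicate run true ++ [true]
            = res ++ List.replicate (run + 1) true ++ ([] : List Bool) := by
          simp [List.replicate_succ']
        rw [hcnt, hend, List.foldl_nil]
        by_cases hshort : ((((List.range' res.length (run+1)).map (Int.ofNat)).length : Nat) : Int) < min_len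
        · simp only [hshort, if_true]
          rw [hrep, clear_run (run+1) res []]
          have hd : decide (min_len ≤ ((run : Int) + 1)) = false := by
            rw [decide_eq_false_iff_not]
            simp only [List.length_map, List.length_range'] at hshort
            push_cast at hshort ⊢; omega
          simp [fcGo, fcFlush, hd]
        · simp only [hshort, if_false]
          have hd : decide (min_len ≤ ((run : Int) + 1)) = true := by
            rw [decide_eq_true_eq]
            simp only [List.length_map, List.length_range'] at hshort
            push_cast at hshort ⊢; omega
          simp [fcGo, fcFlush, hd, List.replicate_succ']
      | false =>
        simp only [fcStep, hget, hlast, beq_self_eq_true, Bool.true_or, Bool.false_or, eq_self_iff_true, if_true, if_false, Bool.false_eq_true,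
          show ((false : Bool) == true) = false from rfl, show ((true : Bool) == false) = false from rfl]
        rw [hend, List.foldl_nil]
        by_cases hshort : ((((List.range' res.length run).map (Int.ofNat)).length : Nat) : Int) < min_len
        · simp only [hshort, if_true]
          rw [show res ++ List.replicate run true ++ [false]
              = res ++ List.replicate run true ++ ([false]) from rfl]
          rw [clear_run run res [false]]
          have hd : decide (min_len ≤ (run : Int)) = false := by
            rw [decide_eq_false_iff_not]
            simp only [List.length_map, List.length_range'] at hshort
            push_cast at hshort ⊢; omega
          simp [fcGo, fcFlush, hd]
        · simp only [hshort, if_false]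
          have hd : decide (min_len ≤ (run : Int)) = true := by
            rw [decide_eq_true_eq]
            simp only [List.length_map, List.length_range'] at hshort
            push_cast at hshort ⊢; omega
          simp [fcGo, fcFlush, hd]
    | cons w u =>
      have hnotlast : decide (((res.length + run : Nat) : Int) + 1
          ≥ ((res ++ List.replicate run true ++ v :: w :: u).length : Int)) = false := by
        simp only [decide_eq_false_iff_not]
        push_cast [List.length_append, List.length_replicate, List.length_cons]
        omega
      cases v with
      | true =>
        simp only [fcStep, hget, hnotlast, beq_self_eq_true, Bool.true_or, Bool.false_or, eq_self_iff_true, if_true, if_false, Bool.false_eq_true,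
          show ((false : Bool) == true) = false from rfl, show ((true : Bool) == false) = false from rfl]
        have hcnt : ((List.range' res.length run).map (Int.ofNat)
            ++ [((res.length + run : Nat) : Int)])
            = (List.range' res.length (run + 1)).map (Int.ofNat) := by
          rw [show List.range' res.length (run + 1)
              = List.range' res.length run ++ [res.length + run] by
            simpa using List.range'_concat (s := res.length) (n := run) (step := 1)]
          simp
        have hrep : res ++ List.replicate run true ++ true :: w :: u
            = res ++ List.replicate (run + 1) true ++ (w :: u) := by
          simp [List.replicate_succ']
        have ihh := ih res (run + 1) (by simp)
        rw [hcnt]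
        rw [show ((res.length + run : Nat) : Int) + 1
            = ((res.length + (run + 1) : Nat) : Int) by push_cast; ring]
        rw [show res ++ List.replicate run true ++ true :: w :: u
            = res ++ List.replicate (run+1) true ++ (w :: u) from hrep] at *
        exact ihh.trans (by simp [fcGo])
      | false =>
        simp only [fcStep, hget, hnotlast, beq_self_eq_true, Bool.true_or, Bool.false_or, eq_self_iff_true, if_true, if_false, Bool.false_eq_true,
          show ((false : Bool) == true) = false from rfl, show ((true : Bool) == false) = false from rfl]
        by_cases hshort : ((((List.range' res.length run).map (Int.ofNat)).length : Nat) : Int) < min_len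
        · simp only [hshort, if_true]
          rw [show res ++ List.replicate run true ++ false :: w :: u
              = res ++ List.replicate run true ++ (false :: w :: u) from rfl]
          rw [clear_run run res (false :: w :: u)]
          have hre : res ++ List.replicate run false ++ false :: w :: u
              = (res ++ List.replicate run false ++ [false]) ++ List.replicate 0 true ++ (w :: u) := by simp
          have hi : ((res.length + run : Nat) : Int) + 1
              = (((res ++ List.replicate run false ++ [false]).length + 0 : Nat) : Int) := by
            push_cast [List.length_append, List.length_replicate, List.length_cons, List.length_nil]
            ring
          have hn : ((res ++ List.replicate run true ++ false :: w :: u).length : Int)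
              = (((res ++ List.replicate run false ++ [false]) ++ List.replicate 0 true ++ (w :: u)).length : Int) := by
            simp
          rw [hre, hi, hn]
          have ihh := ih (res ++ List.replicate run false ++ [false]) 0 (by simp)
          rw [show (List.range' (res ++ List.replicate run false ++ [false]).length 0).map (Int.ofNat) = [] by simp] at ihh
          rw [ihh]
          have hd : decide (min_len ≤ (run : Int)) = false := by
            rw [decide_eq_false_iff_not]
            simp only [List.length_map, List.length_range'] at hshort
            push_cast at hshort ⊢; omega
          simp [fcGo, fcFlush, hd, List.append_assoc]
        · simp only [hshort, if_false]
          have hre : res ++ List.replicate run true ++ false :: w :: u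
              = (res ++ List.replicate run true ++ [false]) ++ List.replicate 0 true ++ (w :: u) := by simp
          have hi : ((res.length + run : Nat) : Int) + 1
              = (((res ++ List.replicate run true ++ [false]).length + 0 : Nat) : Int) := by
            push_cast [List.length_append, List.length_replicate, List.length_cons, List.length_nil]
            ring
          rw [hre, hi]
          have ihh := ih (res ++ List.replicate run true ++ [false]) 0 (by simp)
          rw [show (List.range' (res ++ List.replicate run true ++ [false]).length 0).map (Int.ofNat) = [] by simp] at ihh
          rw [ihh]
          have hd : decide (min_len ≤ (run : Int)) = true := by
            rw [decide_eq_true_eq]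
            simp only [List.length_map, List.length_range'] at hshort
            push_cast at hshort ⊢; omega
          simp [fcGo, fcFlush, hd, List.append_assoc]

-- ===== VERDICT (by name: the statement is the Claim_ definition above) =====
theorem find_consecutive_spec : Claim_equal_find_consecutive := by
  intro data min_len _
  unfold Spec_find_consecutive find_consecutive find_consecutive_alt
  rw [fcGo_foldl min_len data [] 0]
  cases data with
  | nil => simp [fcGo, fcFlush, PySem.List.pyRange]
  | cons v t =>
    have h := fcMain min_len (v :: t) [] 0 (by simp)
    simpa using h
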